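-- pv_equiv track=rewrite | github.com/Daniel90mm/folkevalget | scripts/fetch_data.py | select_primary_document_file
-- ===== SOURCE A (Python) =====
-- from typing import Any
--
-- def select_primary_document_file(files: list[dict[str, Any]]) -> dict[str, Any] | None:
--     for file_row in files:
--         url = str(file_row.get("filurl") or "")
--         if url.lower().endswith(".pdf"):
--             return file_row
--
--     for file_row in files:
--         fmt = str(file_row.get("format") or "")
--         if "pdf" in fmt.lower() and file_row.get("filurl"):
--             return file_row
--
--     for file_row in files:
--         if file_row.get("filurl"):
--             return file_row
--
--     return None
-- ===== SOURCE B (Python) =====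
-- def select_primary_document_file(files):
--     fmt_cand = None
--     url_cand = None
--     for file_row in files:
--         url = str(file_row.get("filurl") or "")
--         if url.lower().endswith(".pdf"):
--             return file_row
--         if fmt_cand is None and "pdf" in str(file_row.get("format") or "").lower() and url:
--             fmt_cand = file_row
--         if url_cand is None and url:
--             url_cand = file_row
--     return fmt_cand if fmt_cand is not None else url_cand
-- ===== Notes on version B (the rewrite author's own statement) =====
-- stated objective: simpler
-- what changed: Replaces A's three sequential full scans with a single pass that returns immediately on a '.pdf' url and maintains two fallback candidates (first pdf-format row with a url, first row with a url).
import Mathlib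
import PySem

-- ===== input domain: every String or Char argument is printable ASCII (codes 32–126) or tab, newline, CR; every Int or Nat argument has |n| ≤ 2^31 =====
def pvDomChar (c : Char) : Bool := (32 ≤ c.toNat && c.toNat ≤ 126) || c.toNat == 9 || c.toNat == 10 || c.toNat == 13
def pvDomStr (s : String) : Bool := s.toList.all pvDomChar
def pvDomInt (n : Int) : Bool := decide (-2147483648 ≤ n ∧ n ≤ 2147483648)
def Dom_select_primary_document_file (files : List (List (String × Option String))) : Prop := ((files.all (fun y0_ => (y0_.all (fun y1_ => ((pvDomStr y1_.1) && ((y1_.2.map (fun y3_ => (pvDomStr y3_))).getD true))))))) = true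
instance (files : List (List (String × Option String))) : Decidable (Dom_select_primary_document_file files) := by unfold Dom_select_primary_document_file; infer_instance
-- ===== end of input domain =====

-- B replaces A's three sequential scans with one pass keeping two fallback candidates (objective: simpler).

-- str(row.get(k) or ""): first-match lookup, None/missing/"" all give ""
def pvGetStr (row : List (String × Option String)) (k : String) : String :=
  match row.lookup k with
  | some (some s) => s
  | _ => ""

-- ===== PORT A =====
-- first loop: url.lower().endswith(".pdf")
def pvALoop1 (files : List (List (String × Option String))) : Option (List (String × Option String)) :=
  match files with
  | [] => none
  | r :: rs =>
    if PySem.Str.endswith (PySem.Str.lower (pvGetStr r "filurl")) ".pdf" then some r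
    else pvALoop1 rs

-- second loop: "pdf" in fmt.lower() and file_row.get("filurl")
def pvALoop2 (files : List (List (String × Option String))) : Option (List (String × Option String)) :=
  match files with
  | [] => none
  | r :: rs =>
    if PySem.Str.isIn "pdf" (PySem.Str.lower (pvGetStr r "format")) && (pvGetStr r "filurl" != "") then some r
    else pvALoop2 rs

-- third loop: file_row.get("filurl")
def pvALoop3 (files : List (List (String × Option String))) : Option (List (String × Option String)) :=
  match files with
  | [] => none
  | r :: rs =>
    if pvGetStr r "filurl" != "" then some r
    else pvALoop3 rs

def select_primary_document_file (files : List (List (String × Option String))) : Option (List (String × Option String)) :=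
  match pvALoop1 files with
  | some r => some r
  | none =>
    match pvALoop2 files with
    | some r => some r
    | none => pvALoop3 files

-- ===== PORT B =====
-- single pass: return on '.pdf' url; else remember first format candidate and first url candidate
def pvBLoop (files : List (List (String × Option String)))
    (fmtC urlC : Option (List (String × Option String))) : Option (List (String × Option String)) :=
  match files with
  | [] => match fmtC with | some r => some r | none => urlC
  | r :: rs =>
    let url := pvGetStr r "filurl"
    if PySem.Str.endswith (PySem.Str.lower url) ".pdf" then some r
    else
      let fmtC' := if fmtC.isNone && PySem.Str.isIn "pdf" (PySem.Str.lower (pvGetStr r "format")) && (url != "") then some r else fmtC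
      let urlC' := if urlC.isNone && (url != "") then some r else urlC
      pvBLoop rs fmtC' urlC'

def select_primary_document_file_alt (files : List (List (String × Option String))) : Option (List (String × Option String)) :=
  pvBLoop files none none

-- ===== PRECONDITION & SPEC =====
def Spec_select_primary_document_file (files : List (List (String × Option String))) (out : Option (List (String × Option String))) : Prop := out = select_primary_document_file_alt files
instance (files : List (List (String × Option String))) (out : Option (List (String × Option String))) : Decidable (Spec_select_primary_document_file files out) := by unfold Spec_select_primary_document_file; infer_instance

-- ===== CLAIM (what is proved, stated in full; the proofs are below) =====
def Claim_equal_select_primary_document_file : Prop := ∀ (files : List (List (String × Option String))), Dom_select_primary_document_file files → Spec_select_primary_document_file files (select_primary_document_file files)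

-- ===== LEMMAS AND PROOFS =====

theorem pv_or_if_aux {a : Type} (c : Bool) (r : a) (L : Option a) :
    (if c = true then some r else none).or L = if c = true then some r else L := by
  cases c <;> simp [Option.or]

-- the one-pass loop with accumulators equals A's three scans with the accumulators taking precedence over later hits
theorem pvBLoop_eq (files : List (List (String × Option String)))
    (fmtC urlC : Option (List (String × Option String))) :
    pvBLoop files fmtC urlC =
      (pvALoop1 files).or ((fmtC.or (pvALoop2 files)).or (urlC.or (pvALoop3 files))) := by
  induction files generalizing fmtC urlC with
  | nil =>
    cases fmtC <;> cases urlC <;> simp [pvBLoop, pvALoop1, pvALoop2, pvALoop3]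
  | cons r rs ih =>
    simp only [pvBLoop, pvALoop1, pvALoop2, pvALoop3]
    by_cases h1 : PySem.Str.endswith (PySem.Str.lower (pvGetStr r "filurl")) ".pdf" = true
    · rw [if_pos h1, if_pos h1]
      simp [Option.or]
    · rw [if_neg h1, if_neg h1, ih]
      congr 1
      congr 1
      · cases fmtC with
        | some f => simp [Option.or]
        | none =>
          simp only [Option.isNone_none, Bool.true_and]
          exact pv_or_if_aux _ r _
      · cases urlC with
        | some f => simp [Option.or]
        | none =>
          simp only [Option.isNone_none, Bool.true_and]
          exact pv_or_if_aux _ r _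

-- ===== VERDICT (by name: the statement is the Claim_ definition above) =====
theorem select_primary_document_file_spec : Claim_equal_select_primary_document_file := by
  intro files _
  unfold Spec_select_primary_document_file select_primary_document_file select_primary_document_file_alt
  rw [pvBLoop_eq]
  cases pvALoop1 files <;> cases h2 : pvALoop2 files <;> simp [Option.or]
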